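-- pv_equiv track=rewrite | github.com/JordiCathew/CS50AI | Week0Search/tictactoe/tictactoe.py | result
-- ===== SOURCE A (Python) =====
-- from copy import deepcopy
--
-- X = "X"
--
-- O = "O"
--
-- EMPTY = None
--
-- def player(board):
--     """
--     Returns player who has the next turn on a board.
--     """
--     empty_case = 0
--     x_case = 0
--     o_case = 0
--
--     for row in board:
--         for state in row:
--             if state == EMPTY:
--                 empty_case += 1
--             elif state == X:
--                 x_case += 1
--             else:
--                 o_case += 1
--
--     if empty_case == 9:
--         return X
--
--     elif x_case > o_case:
--         return O
--
--     elif x_case == o_case: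
--         return X
--
-- def result(board, action):
--     """
--     Returns the board that results from making move (i, j) on the board.
--     """
--     # Whose turn it's to move.
--     turn = player(board)
--     # We need to make a deep copy of the board, since we can't modify the
--     # original because minimax will need the original and consider these copies.
--     copy_board = deepcopy(board)
--
--     invalid_action = 0
--
--     #Action is a tuple (i, j).
--     for count_row, row in enumerate(copy_board):
--         for count_state, state in enumerate(row):
--             if count_row == action[0] and count_state == action[1] and state == EMPTY:
--                 copy_board[count_row][count_state] = turn
--             else:
--                invalid_action += 1
--
--     if invalid_action == 9:
--         raise ValueError("The action is not valid for this board.")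
--     else:
--         return copy_board
-- ===== SOURCE B (Python) =====
-- # Simpler: flat counts decide the turn; one direct bounds-checked indexed update
-- # replaces the nested all-cells scan and its invalid-cell counter.
-- from copy import deepcopy
--
-- X = "X"
-- O = "O"
-- EMPTY = None
--
--
-- def result(board, action):
--     flat = [cell for row in board for cell in row]
--     empties = flat.count(EMPTY)
--     x_count = flat.count(X)
--     o_count = len(flat) - empties - x_count
--     if empties == 9:
--         turn = X
--     elif x_count > o_count:
--         turn = O
--     elif x_count == o_count:
--         turn = X
--     else:
--         turn = EMPTY
--     copy_board = deepcopy(board)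
--     i, j = action
--     if 0 <= i < len(copy_board) and 0 <= j < len(copy_board[i]) and copy_board[i][j] == EMPTY:
--         copy_board[i][j] = turn
--     return copy_board
-- ===== Notes on version B (the rewrite author's own statement) =====
-- stated objective: simpler
-- what changed: B replaces A's nested enumerate scan over every cell (with an invalid-cell counter deciding a raise) by flat counts for the turn and a single bounds-checked direct indexed update; B never raises, returning the unchanged copy on invalid moves, which Pre_ keeps outside the claim.
import Mathlib
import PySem

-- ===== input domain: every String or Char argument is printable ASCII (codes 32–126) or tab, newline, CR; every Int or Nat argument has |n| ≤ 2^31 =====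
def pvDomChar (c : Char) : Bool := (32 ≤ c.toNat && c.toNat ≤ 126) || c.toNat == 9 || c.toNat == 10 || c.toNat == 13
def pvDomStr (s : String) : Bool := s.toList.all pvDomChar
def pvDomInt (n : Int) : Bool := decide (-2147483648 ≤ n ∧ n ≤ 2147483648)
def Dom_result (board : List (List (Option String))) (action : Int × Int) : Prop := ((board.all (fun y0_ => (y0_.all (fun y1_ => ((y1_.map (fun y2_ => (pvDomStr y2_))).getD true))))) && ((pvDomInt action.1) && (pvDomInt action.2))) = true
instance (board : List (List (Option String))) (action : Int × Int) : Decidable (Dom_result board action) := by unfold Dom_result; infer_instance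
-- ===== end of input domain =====

-- B replaces A's nested all-cells scan (and its invalid-cell counter) by flat counts for the
-- turn and one direct bounds-checked indexed update: simpler, same cost.

-- ===== PORT A =====
-- player(board): nested loop counting empty/X/other cells, then the branch chain.
def pvPlayerA (board : List (List (Option String))) : Option String :=
  let c : Int × Int × Int := board.foldl (fun acc row =>
    row.foldl (fun (ac : Int × Int × Int) st =>
      if st = none then (ac.1 + 1, ac.2.1, ac.2.2)
      else if st = some "X" then (ac.1, ac.2.1 + 1, ac.2.2)
      else (ac.1, ac.2.1, ac.2.2 + 1)) acc) ((0 : Int), (0 : Int), (0 : Int))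
  if c.1 = 9 then some "X"
  else if c.2.1 > c.2.2 then some "O"
  else if c.2.1 = c.2.2 then some "X"
  else none

-- result(board, action): nested enumerate loop rebuilding the board cell by cell while
-- counting the non-matching cells; 'raise ValueError' (invalid == 9) is excluded by
-- Pre_result, the port returns [] there as a placeholder.
def result (board : List (List (Option String))) (action : Int × Int) : List (List (Option String)) :=
  let turn := pvPlayerA board
  let st : Int × List (List (Option String)) :=
    (PySem.List.enumerate board 0).foldl (fun acc rp =>
      let inner : Int × List (Option String) :=
        (PySem.List.enumerate rp.2 0).foldl (fun (ac : Int × List (Option String)) cp =>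
          if rp.1 = action.1 ∧ cp.1 = action.2 ∧ cp.2 = none
          then (ac.1, ac.2 ++ [turn])
          else (ac.1 + 1, ac.2 ++ [cp.2])) (acc.1, [])
      (inner.1, acc.2 ++ [inner.2])) ((0 : Int), [])
  if st.1 = 9 then [] else st.2

-- ===== PORT B =====
def result_alt (board : List (List (Option String))) (action : Int × Int) : List (List (Option String)) :=
  let flat := board.flatMap id
  let empties : Int := PySem.List.count flat none
  let xCount : Int := PySem.List.count flat (some "X")
  let oCount : Int := (flat.length : Int) - empties - xCount
  let turn : Option String :=
    if empties = 9 then some "X"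
    else if xCount > oCount then some "O"
    else if xCount = oCount then some "X"
    else none
  let i := action.1
  let j := action.2
  if 0 ≤ i ∧ i < (board.length : Int) ∧ 0 ≤ j ∧ j < ((board.getD i.toNat []).length : Int)
     ∧ (board.getD i.toNat []).getD j.toNat none = none
  then board.set i.toNat ((board.getD i.toNat []).set j.toNat turn)
  else board

-- ===== PRECONDITION & SPEC =====
-- the action points at an in-bounds EMPTY cell
abbrev pvPlaced (board : List (List (Option String))) (action : Int × Int) : Prop :=
  0 ≤ action.1 ∧ action.1 < (board.length : Int) ∧ 0 ≤ action.2
  ∧ action.2 < ((board.getD action.1.toNat []).length : Int)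
  ∧ (board.getD action.1.toNat []).getD action.2.toNat none = none

def pvCells (board : List (List (Option String))) : Nat := (board.map List.length).sum

-- Pre_ excludes exactly the inputs on which A raises ValueError: a 9-cell board with an
-- invalid action, or a 10-cell board with a valid one (A's counter then hits 9 either way).
def Pre_result (board : List (List (Option String))) (action : Int × Int) : Prop :=
  (pvPlaced board action ∧ pvCells board ≠ 10) ∨ (¬ pvPlaced board action ∧ pvCells board ≠ 9)
instance (board : List (List (Option String))) (action : Int × Int) : Decidable (Pre_result board action) := by
  unfold Pre_result pvPlaced; infer_instance

def pvWitness_result : List (List (Option String)) × (Int × Int) :=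
  ([[none, none, none], [none, none, none], [none, none, none]], (1, 1))

def Spec_result (board : List (List (Option String))) (action : Int × Int) (out : List (List (Option String))) : Prop := out = result_alt board action
instance (board : List (List (Option String))) (action : Int × Int) (out : List (List (Option String))) : Decidable (Spec_result board action out) := by unfold Spec_result; infer_instance

-- ===== CLAIM (what is proved, stated in full; the proofs are below) =====
def Claim_equal_result : Prop := ∀ (board : List (List (Option String))) (action : Int × Int), Dom_result board action → Pre_result board action → Spec_result board action (result board action)

-- ===== LEMMAS AND PROOFS =====

-- the value computed for `turn` in result_alt, named for the proofs
def pvTurnB (board : List (List (Option String))) : Option String :=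
  let flat := board.flatMap id
  let empties : Int := PySem.List.count flat none
  let xCount : Int := PySem.List.count flat (some "X")
  let oCount : Int := (flat.length : Int) - empties - xCount
  if empties = 9 then some "X"
  else if xCount > oCount then some "O"
  else if xCount = oCount then some "X"
  else none

theorem pvCountFold (l : List (Option String)) : ∀ (a b c : Int),
    l.foldl (fun (ac : Int × Int × Int) st =>
      if st = none then (ac.1 + 1, ac.2.1, ac.2.2)
      else if st = some "X" then (ac.1, ac.2.1 + 1, ac.2.2)
      else (ac.1, ac.2.1, ac.2.2 + 1)) (a, b, c)
    = (a + (l.count none : Int), b + (l.count (some "X") : Int),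
       c + ((l.length : Int) - (l.count none : Int) - (l.count (some "X") : Int))) := by
  induction l with
  | nil => intro a b c; simp
  | cons st t ih =>
    intro a b c
    simp only [List.foldl_cons]
    rcases st with _ | s
    · rw [if_pos rfl, ih]
      rw [List.count_cons_self, List.count_cons_of_ne (by simp : (none : Option String) ≠ some "X")]
      simp only [List.length_cons, Prod.mk.injEq]
      refine ⟨?_, ?_, ?_⟩ <;> (push_cast; try ring)
    · by_cases hx : s = "X"
      · subst hx
        rw [if_neg (by simp), if_pos rfl, ih]
        rw [List.count_cons_of_ne (by simp : (some "X" : Option String) ≠ none), List.count_cons_self]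
        simp only [List.length_cons, Prod.mk.injEq]
        refine ⟨?_, ?_, ?_⟩ <;> (push_cast; try ring)
      · rw [if_neg (by simp), if_neg (by simp [hx]), ih]
        rw [List.count_cons_of_ne (by simp : (some s : Option String) ≠ none),
            List.count_cons_of_ne (by simp [hx] : (some s : Option String) ≠ some "X")]
        simp only [List.length_cons, Prod.mk.injEq]
        refine ⟨?_, ?_, ?_⟩ <;> (push_cast; try ring)

theorem pvTurn_eq (board : List (List (Option String))) : pvPlayerA board = pvTurnB board := by
  unfold pvPlayerA pvTurnB
  rw [← List.foldl_flatten, pvCountFold]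
  simp [List.flatMap_id, PySem.List.count_eq]

-- map / invalid-count of one row, cell by cell from start index s
def pvMapR (cond : Int → Option String → Prop) [inst : ∀ s st, Decidable (cond s st)]
    (turn : Option String) : List (Option String) → Int → List (Option String)
  | [], _ => []
  | st :: t, s => (if cond s st then turn else st) :: pvMapR cond turn t (s + 1)

def pvInvR (cond : Int → Option String → Prop) [inst : ∀ s st, Decidable (cond s st)] :
    List (Option String) → Int → Int
  | [], _ => 0
  | st :: t, s => (if cond s st then 0 else 1) + pvInvR cond t (s + 1)

theorem pvInner (cond : Int → Option String → Prop) [inst : ∀ s st, Decidable (cond s st)]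
    (turn : Option String) (row : List (Option String)) :
    ∀ (s inv0 : Int) (pre : List (Option String)),
    (PySem.List.enumerate row s).foldl (fun (ac : Int × List (Option String)) cp =>
        if cond cp.1 cp.2 then (ac.1, ac.2 ++ [turn]) else (ac.1 + 1, ac.2 ++ [cp.2]))
      (inv0, pre)
    = (inv0 + pvInvR cond row s, pre ++ pvMapR cond turn row s) := by
  induction row with
  | nil => intro s inv0 pre; simp [PySem.List.enumerate, pvInvR, pvMapR]
  | cons st t ih =>
    intro s inv0 pre
    rw [PySem.List.enumerate_cons]
    simp only [List.foldl_cons]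
    by_cases h : cond s st
    · simp only [if_pos h, ih, pvInvR, pvMapR]
      simp only [Prod.mk.injEq]
      exact ⟨by ring, by simp⟩
    · simp only [if_neg h, ih, pvInvR, pvMapR]
      simp only [Prod.mk.injEq]
      exact ⟨by ring, by simp⟩

-- map / invalid-count of the whole board, row by row from row index s
def pvMapB (i j : Int) (turn : Option String) : List (List (Option String)) → Int → List (List (Option String))
  | [], _ => []
  | row :: t, s =>
      pvMapR (fun c st => s = i ∧ c = j ∧ st = none) turn row 0 :: pvMapB i j turn t (s + 1)

def pvInvB (i j : Int) : List (List (Option String)) → Int → Int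
  | [], _ => 0
  | row :: t, s => pvInvR (fun c st => s = i ∧ c = j ∧ st = none) row 0 + pvInvB i j t (s + 1)

theorem pvOuter (i j : Int) (turn : Option String) (board : List (List (Option String))) :
    ∀ (s inv0 : Int) (pre : List (List (Option String))),
    (PySem.List.enumerate board s).foldl (fun (acc : Int × List (List (Option String))) rp =>
      let inner : Int × List (Option String) :=
        (PySem.List.enumerate rp.2 0).foldl (fun (ac : Int × List (Option String)) cp =>
          if rp.1 = i ∧ cp.1 = j ∧ cp.2 = none
          then (ac.1, ac.2 ++ [turn])
          else (ac.1 + 1, ac.2 ++ [cp.2])) (acc.1, [])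
      (inner.1, acc.2 ++ [inner.2])) (inv0, pre)
    = (inv0 + pvInvB i j board s, pre ++ pvMapB i j turn board s) := by
  induction board with
  | nil => intro s inv0 pre; simp [PySem.List.enumerate, pvInvB, pvMapB]
  | cons row t ih =>
    intro s inv0 pre
    rw [PySem.List.enumerate_cons]
    simp only [List.foldl_cons]
    rw [pvInner (fun c st => s = i ∧ c = j ∧ st = none) turn row 0]
    simp only [pvInvB, pvMapB]
    rw [ih]
    simp only [Prod.mk.injEq]
    exact ⟨by ring, by simp⟩

theorem pvResult_eq (board : List (List (Option String))) (action : Int × Int) :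
    result board action =
      (if pvInvB action.1 action.2 board 0 = 9 then []
       else pvMapB action.1 action.2 (pvPlayerA board) board 0) := by
  simp only [result]
  rw [pvOuter action.1 action.2 (pvPlayerA board) board 0 0 []]
  simp

-- pointwise no-match ⇒ a row maps to itself and contributes its full length
theorem pvMapR_self (cond : Int → Option String → Prop) [inst : ∀ s st, Decidable (cond s st)]
    (turn : Option String) (row : List (Option String)) :
    ∀ (s : Int), (∀ (k : Nat) (hk : k < row.length), ¬ cond (s + k) row[k]) →
    pvMapR cond turn row s = row := by
  induction row with
  | nil => intro s _; rfl
  | cons st t ih =>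
    intro s h
    have h0 : ¬ cond s st := by simpa using h 0 (by simp)
    simp only [pvMapR, if_neg h0]
    rw [ih (s + 1)]
    intro k hk
    have := h (k + 1) (by simpa using Nat.succ_lt_succ hk)
    simpa [add_assoc, add_comm, add_left_comm] using this

theorem pvInvR_len (cond : Int → Option String → Prop) [inst : ∀ s st, Decidable (cond s st)]
    (row : List (Option String)) :
    ∀ (s : Int), (∀ (k : Nat) (hk : k < row.length), ¬ cond (s + k) row[k]) →
    pvInvR cond row s = (row.length : Int) := by
  induction row with
  | nil => intro s _; rfl
  | cons st t ih =>
    intro s h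
    have h0 : ¬ cond s st := by simpa using h 0 (by simp)
    simp only [pvInvR, if_neg h0]
    rw [ih (s + 1)]
    · simp; ring
    · intro k hk
      have := h (k + 1) (by simpa using Nat.succ_lt_succ hk)
      simpa [add_assoc, add_comm, add_left_comm] using this

theorem pvMapB_self (i j : Int) (turn : Option String) (board : List (List (Option String))) :
    ∀ (s : Int),
    (∀ (r : Nat) (hr : r < board.length) (c : Nat) (hc : c < board[r].length),
        ¬ ((s + r : Int) = i ∧ (c : Int) = j ∧ board[r][c] = none)) →
    pvMapB i j turn board s = board := by
  induction board with
  | nil => intro s _; rfl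
  | cons row t ih =>
    intro s h
    simp only [pvMapB]
    rw [pvMapR_self, ih (s + 1)]
    · intro r hr c hc
      have := h (r + 1) (by simpa using Nat.succ_lt_succ hr) c (by simpa using hc)
      simpa [add_assoc, add_comm, add_left_comm] using this
    · intro k hk
      have := h 0 (by simp) k (by simpa using hk)
      simpa using this

theorem pvInvB_cells (i j : Int) (board : List (List (Option String))) :
    ∀ (s : Int),
    (∀ (r : Nat) (hr : r < board.length) (c : Nat) (hc : c < board[r].length),
        ¬ ((s + r : Int) = i ∧ (c : Int) = j ∧ board[r][c] = none)) →
    pvInvB i j board s = (pvCells board : Int) := by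
  induction board with
  | nil => intro s _; rfl
  | cons row t ih =>
    intro s h
    simp only [pvInvB]
    rw [pvInvR_len, ih (s + 1)]
    · simp [pvCells]
    · intro r hr c hc
      have := h (r + 1) (by simpa using Nat.succ_lt_succ hr) c (by simpa using hc)
      simpa [add_assoc, add_comm, add_left_comm] using this
    · intro k hk
      have := h 0 (by simp) k (by simpa using hk)
      simpa using this

theorem pvMapR_hit (P : Prop) [hdP : Decidable P] (hP : P) (j : Int) (turn : Option String)
    (row : List (Option String)) :
    ∀ (s : Int) (jN : Nat) (hj : jN < row.length), j = s + jN → row[jN] = none →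
    pvMapR (fun c st => P ∧ c = j ∧ st = none) turn row s = row.set jN turn := by
  induction row with
  | nil => intro s jN hj _ _; simp at hj
  | cons st t ih =>
    intro s jN hj hjj hcell
    cases jN with
    | zero =>
      simp only [List.getElem_cons_zero] at hcell
      have hc : P ∧ s = j ∧ st = none := ⟨hP, by push_cast at hjj; omega, hcell⟩
      simp only [pvMapR, if_pos hc, List.set_cons_zero]
      rw [pvMapR_self]
      intro k hk
      rintro ⟨-, h2, -⟩
      push_cast at hjj h2; omega
    | succ n =>
      simp only [List.getElem_cons_succ] at hcell
      have hc : ¬ (P ∧ s = j ∧ st = none) := by rintro ⟨-, h2, -⟩; push_cast at hjj; omega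
      simp only [pvMapR, if_neg hc, List.set_cons_succ]
      rw [ih (s + 1) n (by simpa using Nat.lt_of_succ_lt_succ hj) (by push_cast at hjj ⊢; omega) hcell]

theorem pvInvR_hit (P : Prop) [hdP : Decidable P] (hP : P) (j : Int)
    (row : List (Option String)) :
    ∀ (s : Int) (jN : Nat) (hj : jN < row.length), j = s + jN → row[jN] = none →
    pvInvR (fun c st => P ∧ c = j ∧ st = none) row s = (row.length : Int) - 1 := by
  induction row with
  | nil => intro s jN hj _ _; simp at hj
  | cons st t ih =>
    intro s jN hj hjj hcell
    cases jN with
    | zero =>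
      simp only [List.getElem_cons_zero] at hcell
      have hc : P ∧ s = j ∧ st = none := ⟨hP, by push_cast at hjj; omega, hcell⟩
      simp only [pvInvR, if_pos hc]
      rw [pvInvR_len]
      · simp
      · intro k hk
        rintro ⟨-, h2, -⟩
        push_cast at hjj h2; omega
    | succ n =>
      simp only [List.getElem_cons_succ] at hcell
      have hc : ¬ (P ∧ s = j ∧ st = none) := by rintro ⟨-, h2, -⟩; push_cast at hjj; omega
      simp only [pvInvR, if_neg hc]
      rw [ih (s + 1) n (by simpa using Nat.lt_of_succ_lt_succ hj) (by push_cast at hjj ⊢; omega) hcell]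
      simp only [List.length_cons]; push_cast; ring

theorem pvMapB_hit (i j : Int) (turn : Option String) (board : List (List (Option String))) :
    ∀ (s : Int) (iN : Nat) (hi : iN < board.length) (jN : Nat) (hj : jN < board[iN].length),
    i = s + iN → j = (jN : Int) → board[iN][jN] = none →
    pvMapB i j turn board s = board.set iN (board[iN].set jN turn) := by
  induction board with
  | nil => intro s iN hi; simp at hi
  | cons row t ih =>
    intro s iN hi jN hj hii hjj hcell
    cases iN with
    | zero =>
      simp only [List.getElem_cons_zero] at hj hcell
      simp only [pvMapB, List.getElem_cons_zero, List.set_cons_zero]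
      rw [pvMapR_hit (s = i) (by push_cast at hii; omega) j turn row 0 jN hj (by omega) hcell]
      rw [pvMapB_self]
      intro r hr c hc
      rintro ⟨h1, -, -⟩
      push_cast at hii h1; omega
    | succ n =>
      simp only [List.getElem_cons_succ] at hj hcell
      simp only [pvMapB, List.set_cons_succ, List.getElem_cons_succ]
      rw [ih (s + 1) n (by simpa using Nat.lt_of_succ_lt_succ hi) jN hj (by push_cast at hii ⊢; omega) hjj hcell]
      rw [pvMapR_self]
      intro k hk
      rintro ⟨h1, -, -⟩
      push_cast at hii h1; omega

theorem pvInvB_hit (i j : Int) (board : List (List (Option String))) :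
    ∀ (s : Int) (iN : Nat) (hi : iN < board.length) (jN : Nat) (hj : jN < board[iN].length),
    i = s + iN → j = (jN : Int) → board[iN][jN] = none →
    pvInvB i j board s = (pvCells board : Int) - 1 := by
  induction board with
  | nil => intro s iN hi; simp at hi
  | cons row t ih =>
    intro s iN hi jN hj hii hjj hcell
    cases iN with
    | zero =>
      simp only [List.getElem_cons_zero] at hj hcell
      simp only [pvInvB]
      rw [pvInvR_hit (s = i) (by push_cast at hii; omega) j row 0 jN hj (by omega) hcell]
      rw [pvInvB_cells]
      · simp only [pvCells, List.map_cons, List.sum_cons]; push_cast; ring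
      · intro r hr c hc
        rintro ⟨h1, -, -⟩
        push_cast at hii h1; omega
    | succ n =>
      simp only [List.getElem_cons_succ] at hj hcell
      simp only [pvInvB]
      rw [ih (s + 1) n (by simpa using Nat.lt_of_succ_lt_succ hi) jN hj (by push_cast at hii ⊢; omega) hjj hcell]
      rw [pvInvR_len]
      · simp only [pvCells, List.map_cons, List.sum_cons]; push_cast; ring
      · intro k hk
        rintro ⟨h1, -, -⟩
        push_cast at hii h1; omega

theorem pvResultAlt_eq (board : List (List (Option String))) (action : Int × Int) :
    result_alt board action =
      (if pvPlaced board action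
       then board.set action.1.toNat
              ((board.getD action.1.toNat []).set action.2.toNat (pvTurnB board))
       else board) := by
  simp only [result_alt, pvTurnB]

theorem result_spec : Claim_equal_result := by
  intro board action hdom hpre
  unfold Spec_result
  rw [pvResult_eq, pvResultAlt_eq]
  rcases hpre with ⟨hp, hc⟩ | ⟨hnp, hc⟩
  · -- valid action: the unique matching cell is set, invalid = cells - 1 ≠ 9 since cells ≠ 10
    obtain ⟨h0, h1, h2, h3, h4⟩ := hp
    have hiN : action.1.toNat < board.length := by omega
    have hgd : board.getD action.1.toNat [] = board[action.1.toNat] :=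
      List.getD_eq_getElem board [] hiN
    rw [hgd] at h3 h4
    have hjN : action.2.toNat < board[action.1.toNat].length := by omega
    have hgd2 : board[action.1.toNat].getD action.2.toNat none = board[action.1.toNat][action.2.toNat] :=
      List.getD_eq_getElem _ none hjN
    rw [hgd2] at h4
    rw [pvMapB_hit action.1 action.2 (pvPlayerA board) board 0 action.1.toNat hiN
          action.2.toNat hjN (by omega) (by omega) h4,
        pvInvB_hit action.1 action.2 board 0 action.1.toNat hiN action.2.toNat hjN
          (by omega) (by omega) h4]
    rw [if_neg (by omega : ¬ ((pvCells board : Int) - 1 = 9)),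
        if_pos (by exact ⟨h0, h1, h2, by rw [hgd]; exact h3, by rw [hgd, hgd2]; exact h4⟩ : pvPlaced board action)]
    rw [hgd, pvTurn_eq]
  · -- invalid action: nothing matches, the copy is the board itself, invalid = cells ≠ 9
    have hnomatch : ∀ (r : Nat) (hr : r < board.length) (c : Nat) (hc : c < board[r].length),
        ¬ (((0 : Int) + r) = action.1 ∧ (c : Int) = action.2 ∧ board[r][c] = none) := by
      intro r hr c hc
      rintro ⟨h1, h2, h3⟩
      apply hnp
      refine ⟨by omega, by omega, by omega, ?_, ?_⟩
      · have : action.1.toNat = r := by omega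
        rw [this, List.getD_eq_getElem board [] hr]
        omega
      · have hr' : action.1.toNat = r := by omega
        rw [hr', List.getD_eq_getElem board [] hr]
        have hc' : action.2.toNat = c := by omega
        rw [hc', List.getD_eq_getElem _ none (by omega)]
        exact h3
    rw [pvMapB_self action.1 action.2 (pvPlayerA board) board 0 hnomatch,
        pvInvB_cells action.1 action.2 board 0 hnomatch]
    rw [if_neg (by exact_mod_cast hc : ¬ ((pvCells board : Int) = 9)), if_neg hnp]
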